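-- pv_equiv track=rewrite | github.com/nishprabhu/Sci-Blogger | readability.py | syllables
-- ===== SOURCE A (Python) =====
-- def syllables(word):
--     count = 0
--     vowels = 'aeiouy'
--     word = word.lower().strip(".:?!")
-- #    print (word)
--     if len(word)==0:
--         return count
--     if word[0] in vowels:
--         count +=1
--     for index in range(1,len(word)):
--         if word[index] in vowels and word[index-1] not in vowels:
--             count +=1
--     if word.endswith('e'):
--         count -= 1
--     if word.endswith('le'):
--         count+=1
--     if count == 0:
--         count +=1
--     return count
-- ===== SOURCE B (Python) =====
-- def syllables(word):
--     word = word.lower().strip(".:?!")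
--     if not word:
--         return 0
--     vowels = 'aeiouy'
--     groups = ''.join(c if c in vowels else ' ' for c in word).split()
--     count = len(groups)
--     if word.endswith('e') and not word.endswith('le'):
--         count -= 1
--     return max(count, 1)
-- ===== Notes on version B (the rewrite author's own statement) =====
-- stated objective: alternative
-- what changed: B replaces A's single indexed scan comparing word[i] with word[i-1] by a staged pipeline: translate every non-vowel to a space, let str.split() cut the string into the vowel groups, and take len() of that list; A's three sequential tail adjustments (-1 for 'e', +1 for 'le', floor to 1) are folded into one combined condition plus max(count, 1).
import Mathlib
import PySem

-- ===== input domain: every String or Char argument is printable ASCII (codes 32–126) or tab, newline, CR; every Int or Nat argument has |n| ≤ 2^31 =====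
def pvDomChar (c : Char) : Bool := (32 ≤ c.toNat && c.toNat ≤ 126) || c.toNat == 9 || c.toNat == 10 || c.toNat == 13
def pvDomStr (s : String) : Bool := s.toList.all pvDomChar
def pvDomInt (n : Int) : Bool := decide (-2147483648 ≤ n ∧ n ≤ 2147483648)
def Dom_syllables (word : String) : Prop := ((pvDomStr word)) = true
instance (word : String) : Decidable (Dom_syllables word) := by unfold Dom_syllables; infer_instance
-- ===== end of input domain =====

-- B replaces A's indexed transition scan by a staged pipeline: translate non-vowels to spaces,
-- split on whitespace, and take the number of pieces; A's three sequential tail adjustments are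
-- folded into one combined condition plus max(count, 1). Same O(n) cost.

/-- `c in 'aeiouy'` (shared vowel test of both programs). -/
def isVowel (c : Char) : Bool := ['a','e','i','o','u','y'].contains c

-- ===== PORT A =====
def syllables (word : String) : Int :=
  let w := PySem.Chars.stripChars (PySem.Chars.lower word.toList) ".:?!".toList
  let count : Int := 0
  if PySem.Chars.len w == 0 then count
  else
    let count := if isVowel (PySem.List.pyGetD w 0 ' ') then count + 1 else count
    let count := (PySem.List.pyRange 1 (PySem.Chars.len w) 1).foldl
      (fun count index =>
        if isVowel (PySem.List.pyGetD w index ' ') && !isVowel (PySem.List.pyGetD w (index - 1) ' ')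
        then count + 1 else count) count
    let count := if PySem.Chars.endswith w ['e'] then count - 1 else count
    let count := if PySem.Chars.endswith w ['l','e'] then count + 1 else count
    if count == 0 then count + 1 else count

-- ===== PORT B =====
def syllables_alt (word : String) : Int :=
  let w := PySem.Chars.stripChars (PySem.Chars.lower word.toList) ".:?!".toList
  if w.isEmpty then 0
  else
    let groups := PySem.Chars.split₀ (w.map (fun c => if isVowel c then c else ' '))
    let count : Int := groups.length
    let count :=
      if PySem.Chars.endswith w ['e'] && !PySem.Chars.endswith w ['l','e'] then count - 1 else count
    max count 1

-- ===== PRECONDITION & SPEC =====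
def Spec_syllables (word : String) (out : Int) : Prop := out = syllables_alt word
instance (word : String) (out : Int) : Decidable (Spec_syllables word out) := by unfold Spec_syllables; infer_instance

-- ===== CLAIM (what is proved, stated in full; the proofs are below) =====
def Claim_equal_syllables : Prop := ∀ (word : String), Dom_syllables word → Spec_syllables word (syllables word)

-- ===== LEMMAS AND PROOFS =====

/-- Number of maximal runs of vowels (proof-side characterisation of both counts). -/
def countRuns : List Char → Int
  | [] => 0
  | c :: rest =>
      if isVowel c then 1 + countRuns (rest.dropWhile isVowel)
      else countRuns rest
termination_by l => l.length
decreasing_by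
  · simp only [List.length_cons]
    have := List.length_dropWhile_le (p := isVowel) (l := rest)
    omega
  · simp

/-- Transition count of A's inner loop, as a recursion carrying the previous char. -/
def pairs : Char → List Char → Int
  | _, [] => 0
  | p, c :: rest => (if isVowel c && !isVowel p then 1 else 0) + pairs c rest

lemma countRuns_nonneg (l : List Char) : 0 ≤ countRuns l := by
  induction l using countRuns.induct with
  | case1 => simp [countRuns]
  | case2 c rest h ih => simp [countRuns, h]; omega
  | case3 c rest h ih => simpa [countRuns, h] using ih

lemma countRuns_pos {l : List Char} (h : ∃ c ∈ l, isVowel c) : 1 ≤ countRuns l := by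
  induction l using countRuns.induct with
  | case1 => simp at h
  | case2 c rest hv ih =>
      have := countRuns_nonneg (rest.dropWhile isVowel)
      simp [countRuns, hv]; omega
  | case3 c rest hv ih =>
      obtain ⟨d, hd, hdv⟩ := h
      rcases hd with _ | hd
      · simp [hdv] at hv
      · simpa [countRuns, hv] using ih ⟨d, by assumption, hdv⟩

lemma pairs_eq (l : List Char) : ∀ p : Char,
    pairs p l = if isVowel p then countRuns (l.dropWhile isVowel) else countRuns l := by
  induction l with
  | nil => intro p; simp [pairs, countRuns, List.dropWhile]
  | cons c rest ih =>
      intro p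
      by_cases hp : isVowel p <;> by_cases hc : isVowel c <;>
        simp [pairs, countRuns, List.dropWhile, hp, hc, ih c]

/-- A's index loop, unrolled from position `a` (1 ≤ a), equals `pairs` of the suffix. -/
lemma loop_eq (w : List Char) : ∀ k a : Nat, a = w.length - k → 1 ≤ a → ∀ count : Int,
    (PySem.List.pyRange (a : Int) (w.length : Int) 1).foldl
      (fun count index =>
        if isVowel (PySem.List.pyGetD w index ' ') && !isVowel (PySem.List.pyGetD w (index - 1) ' ')
        then count + 1 else count) count
    = count + pairs (w.getD (a - 1) ' ') (w.drop a) := by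
  intro k
  induction k with
  | zero =>
      intro a ha h1 count
      rw [PySem.List.pyRange_one_eq_nil (by omega)]
      rw [List.drop_of_length_le (by omega)]
      simp [pairs]
  | succ k ih =>
      intro a ha h1 count
      by_cases hlt : a < w.length
      · rw [PySem.List.pyRange_one_cons (by exact_mod_cast hlt)]
        simp only [List.foldl_cons]
        have hcast : ((a : Int) + 1) = ((a + 1 : Nat) : Int) := by push_cast; ring
        have hga : PySem.List.pyGetD w (a : Int) ' ' = w.getD a ' ' := by
          simp [PySem.List.pyGetD_natCast]
        have hga1 : PySem.List.pyGetD w ((a : Int) - 1) ' ' = w.getD (a - 1) ' ' := by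
          have : ((a : Int) - 1) = ((a - 1 : Nat) : Int) := by omega
          rw [this]; simp [PySem.List.pyGetD_natCast]
        have hdrop : w.drop a = w[a] :: w.drop (a + 1) := by
          rw [List.drop_eq_getElem_cons hlt]
        have hgd : w.getD a ' ' = w[a] := List.getD_eq_getElem w ' ' hlt
        rw [hga, hga1, hcast, ih (a + 1) (by omega) (by omega), Nat.add_sub_cancel, hdrop]
        simp only [pairs]
        rw [hgd]
        split_ifs <;> ring
      · rw [PySem.List.pyRange_one_eq_nil (by omega)]
        rw [List.drop_of_length_le (by omega)]
        simp [pairs]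

/-- Head case + loop = total run count, for nonempty w. -/
lemma count_eq_countRuns (w : List Char) (hw : w ≠ []) :
    ((PySem.List.pyRange 1 (w.length : Int) 1).foldl
      (fun count index =>
        if isVowel (PySem.List.pyGetD w index ' ') && !isVowel (PySem.List.pyGetD w (index - 1) ' ')
        then count + 1 else count)
      (if isVowel (PySem.List.pyGetD w 0 ' ') then (0 : Int) + 1 else 0))
    = countRuns w := by
  have hlen : 1 ≤ w.length := by
    cases w with
    | nil => exact absurd rfl hw
    | cons c rest => simp
  have h := loop_eq w (w.length - 1) 1 (by omega) (by omega)
      (if isVowel (PySem.List.pyGetD w 0 ' ') then (0 : Int) + 1 else 0)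
  rw [Nat.cast_one] at h
  rw [h]
  obtain ⟨c, rest, rfl⟩ := List.exists_cons_of_ne_nil hw
  have hg0 : PySem.List.pyGetD (c :: rest) 0 ' ' = c := by
    simp [PySem.List.pyGetD_zero_cons]
  rw [hg0]
  simp only [show (1 - 1 : Nat) = 0 from rfl, List.getD_cons_zero, List.drop_one, List.tail_cons]
  rw [pairs_eq rest c]
  by_cases hc : isVowel c <;> simp [countRuns, hc]

lemma isVowel_not_isspace {c : Char} (h : isVowel c = true) : PySem.Chars.isspace c = false := by
  simp [isVowel] at h
  rcases h with rfl | rfl | rfl | rfl | rfl | rfl <;> decide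

/-- B's split of the masked word, via the accumulator loop of `split₀`. -/
lemma go_mask (w : List Char) : ∀ (cur : List Char) (acc : List (List Char)),
    ((PySem.Chars.split₀.go (w.map (fun c => if isVowel c then c else ' ')) cur acc).length : Int)
      = acc.length + (if cur.isEmpty then (0 : Int) else 1)
        + (if cur.isEmpty then countRuns w else countRuns (w.dropWhile isVowel)) := by
  induction w with
  | nil =>
      intro cur acc
      by_cases hc : cur.isEmpty <;>
        simp [PySem.Chars.split₀.go, hc, countRuns]
  | cons c rest ih =>
      intro cur acc
      by_cases hv : isVowel c
      · have hsp : PySem.Chars.isspace c = false := isVowel_not_isspace hv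
        simp only [List.map_cons, hv, if_true, PySem.Chars.split₀.go, hsp,
          Bool.false_eq_true, if_false]
        rw [ih (c :: cur) acc]
        by_cases hc : cur.isEmpty <;>
          simp [hc, countRuns, hv, List.isEmpty_cons] <;> ring
      · have hdw : (c :: rest).dropWhile isVowel = c :: rest := by
          simp [hv]
        simp only [List.map_cons, hv, Bool.false_eq_true, if_false, PySem.Chars.split₀.go,
          show PySem.Chars.isspace ' ' = true from rfl, if_true]
        by_cases hc : cur.isEmpty
        · simp only [hc, if_true]
          rw [ih [] acc]
          simp [countRuns, hv]
        · simp only [hc, Bool.false_eq_true, if_false]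
          rw [ih [] (cur.reverse :: acc)]
          simp [countRuns, hv, hdw]
  
lemma split_length_eq (w : List Char) :
    ((PySem.Chars.split₀ (w.map (fun c => if isVowel c then c else ' '))).length : Int)
      = countRuns w := by
  have := go_mask w [] []
  simpa [PySem.Chars.split₀] using this

lemma endswith_e_vowel {w : List Char} (h : PySem.Chars.endswith w ['e'] = true) :
    ∃ c ∈ w, isVowel c := by
  have := (PySem.Chars.endswith_iff w ['e']).mp h
  obtain ⟨t, rfl⟩ := this
  exact ⟨'e', by simp, by decide⟩

lemma endswith_le_e {w : List Char} (h : PySem.Chars.endswith w ['l','e'] = true) :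
    PySem.Chars.endswith w ['e'] = true := by
  rw [PySem.Chars.endswith_iff] at h ⊢
  exact List.IsSuffix.trans (by simp) h

-- ===== VERDICT (by name: the statement is the Claim_ definition above) =====
theorem syllables_spec : Claim_equal_syllables := by
  intro word _
  unfold Spec_syllables syllables syllables_alt
  generalize PySem.Chars.stripChars (PySem.Chars.lower word.toList) ".:?!".toList = w
  by_cases hemp : w = []
  · rw [hemp]; decide
  · have hlen0 : w.length ≠ 0 := by
      intro h; exact hemp (List.length_eq_zero_iff.mp h)
    have hA : ((w.length : Int) == 0) = false := by
      simp [hlen0]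
    have hB : w.isEmpty = false := by
      simp [hemp]
    simp only [PySem.Chars.len_eq, hA, hB, Bool.false_eq_true, if_false]
    rw [count_eq_countRuns w hemp, split_length_eq w]
    have hr0 : 0 ≤ countRuns w := countRuns_nonneg w
    by_cases hle : PySem.Chars.endswith w ['l','e'] = true
    · have he : PySem.Chars.endswith w ['e'] = true := endswith_le_e hle
      have hr1 : 1 ≤ countRuns w := countRuns_pos (endswith_e_vowel he)
      simp only [he, hle, if_true, Bool.not_true, Bool.and_false,
        Bool.false_eq_true, if_false, beq_iff_eq]
      split_ifs with h0 <;> omega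
    · by_cases he : PySem.Chars.endswith w ['e'] = true
      · have hr1 : 1 ≤ countRuns w := countRuns_pos (endswith_e_vowel he)
        simp only [Bool.not_eq_true] at hle
        simp only [he, if_true, hle, Bool.false_eq_true, if_false, Bool.not_false,
          Bool.and_self, beq_iff_eq]
        split_ifs with h0 <;> omega
      · simp only [Bool.not_eq_true] at he hle
        simp only [he, hle, Bool.false_eq_true, if_false, Bool.false_and, beq_iff_eq]
        split_ifs with h0 <;> omega
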